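-- pv_equiv track=rewrite | github.com/Lilalalara/dndDiscordBot | utils.py | keep_drop
-- ===== SOURCE A (Python) =====
-- def keep_drop(dice_rolls, high_low, mod):
--     new_rolls = dice_rolls
--     extra = []
--     for _ in range(mod):
--         if high_low == 'h':
--             mini = min(dice_rolls)
--             new_rolls.remove(mini)
--             extra.append(f"({mini})")
--         if high_low == 'l':
--             maxi = max(dice_rolls)
--             new_rolls.remove(maxi)
--             extra.append(f"({maxi})")
--     return new_rolls, extra
-- ===== SOURCE B (Python) =====
-- def keep_drop(dice_rolls, high_low, mod):
--     # Note: A mutates dice_rolls in place; B does not (return value is identical).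
--     k = max(mod, 0)
--     if high_low == 'h':
--         removed = sorted(dice_rolls)[:k]
--     elif high_low == 'l':
--         removed = sorted(dice_rolls, reverse=True)[:k]
--     else:
--         return dice_rolls, []
--     cnt = {}
--     for v in removed:
--         cnt[v] = cnt.get(v, 0) + 1
--     kept = []
--     for v in dice_rolls:
--         if cnt.get(v, 0) > 0:
--             cnt[v] = cnt[v] - 1
--         else:
--             kept.append(v)
--     return kept, ["({})".format(v) for v in removed]
-- ===== Notes on version B (the rewrite author's own statement) =====
-- stated objective: alternative
-- what changed: Instead of mod passes each rescanning the list for its min/max and removing it, B sorts once, takes the first mod entries of the sorted (or reverse-sorted) list as the removed values, and drops their earliest occurrences in a single counter-guided pass.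
import Mathlib
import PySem

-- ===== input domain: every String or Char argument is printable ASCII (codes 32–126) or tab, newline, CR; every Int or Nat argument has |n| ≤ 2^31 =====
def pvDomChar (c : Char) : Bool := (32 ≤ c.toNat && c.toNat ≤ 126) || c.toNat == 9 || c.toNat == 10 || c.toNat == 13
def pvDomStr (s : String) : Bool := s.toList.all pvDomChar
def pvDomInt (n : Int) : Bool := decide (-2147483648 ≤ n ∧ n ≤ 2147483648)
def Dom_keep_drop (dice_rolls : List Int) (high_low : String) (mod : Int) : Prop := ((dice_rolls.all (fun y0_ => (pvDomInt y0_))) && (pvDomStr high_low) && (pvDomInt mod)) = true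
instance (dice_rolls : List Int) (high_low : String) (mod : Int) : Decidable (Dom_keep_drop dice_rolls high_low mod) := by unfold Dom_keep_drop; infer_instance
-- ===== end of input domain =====

-- B replaces A's mod-pass min/max-remove loop by one sort plus a single counter-guided pass.
-- (Python A mutates dice_rolls in place; the equivalence proved here is about the return value.)

-- f"({m})" — shared formatting of a removed value
def pvFmt (m : Int) : String := "(" ++ PySem.Int.toStr m ++ ")"

-- ===== PORT A =====
-- one iteration of A's for-loop body
def pvStepA (high_low : String) (st : List Int × List String) : List Int × List String :=
  let st1 :=
    if high_low = "h" then
      match PySem.List.min? st.1 (fun x => x) with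
      | some m => ((PySem.List.remove? st.1 m).getD st.1, st.2 ++ [pvFmt m])
      | none => st          -- Python raises here (min of empty); excluded by Pre_
    else st
  if high_low = "l" then
    match PySem.List.max? st1.1 (fun x => x) with
    | some m => ((PySem.List.remove? st1.1 m).getD st1.1, st1.2 ++ [pvFmt m])
    | none => st1           -- Python raises here (max of empty); excluded by Pre_
  else st1

-- for _ in range(mod): …   (range(mod) runs max(mod,0) = mod.toNat times)
def pvLoopA (high_low : String) : Nat → (List Int × List String) → (List Int × List String)
  | 0, st => st
  | n + 1, st => pvLoopA high_low n (pvStepA high_low st)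

def keep_drop (dice_rolls : List Int) (high_low : String) (mod : Int) : List Int × List String :=
  pvLoopA high_low mod.toNat (dice_rolls, [])

-- ===== PORT B =====
-- B's second loop: keep each element unless the counter still owes a removal of that value
def pvScanB (cnt : PySem.Dict Int Int) : List Int → List Int
  | [] => []
  | x :: xs =>
    if cnt.getD x 0 > 0 then pvScanB (cnt.insert x (cnt.getD x 0 - 1)) xs
    else x :: pvScanB cnt xs

def keep_drop_alt (dice_rolls : List Int) (high_low : String) (mod : Int) : List Int × List String :=
  let k : Int := max mod 0
  let removed? : Option (List Int) :=
    if high_low = "h" then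
      some (PySem.List.slice (PySem.List.sorted dice_rolls (fun x => x) false) none (some k))
    else if high_low = "l" then
      some (PySem.List.slice (PySem.List.sorted dice_rolls (fun x => x) true) none (some k))
    else none
  match removed? with
  | none => (dice_rolls, [])
  | some removed =>
    let cnt := removed.foldl (fun d v => d.insert v (d.getD v 0 + 1)) PySem.Dict.empty
    (pvScanB cnt dice_rolls, removed.map (fun v => pvFmt v))

-- ===== PRECONDITION & SPEC =====
-- Pre_ excludes exactly the inputs where A raises ValueError: high_low 'h'/'l' with mod > len(dice_rolls)
-- (min/max of an empty list inside the loop).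
def Pre_keep_drop (dice_rolls : List Int) (high_low : String) (mod : Int) : Prop :=
  (high_low = "h" ∨ high_low = "l") → mod ≤ (dice_rolls.length : Int)
instance (dice_rolls : List Int) (high_low : String) (mod : Int) : Decidable (Pre_keep_drop dice_rolls high_low mod) := by unfold Pre_keep_drop; infer_instance

def pvWitness_keep_drop : List Int × String × Int := ([3, 1, 2], "h", 2)

def Spec_keep_drop (dice_rolls : List Int) (high_low : String) (mod : Int) (out : List Int × List String) : Prop := out = keep_drop_alt dice_rolls high_low mod
instance (dice_rolls : List Int) (high_low : String) (mod : Int) (out : List Int × List String) : Decidable (Spec_keep_drop dice_rolls high_low mod out) := by unfold Spec_keep_drop; infer_instance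

-- ===== CLAIM (what is proved, stated in full; the proofs are below) =====
def Claim_equal_keep_drop : Prop := ∀ (dice_rolls : List Int) (high_low : String) (mod : Int), Dom_keep_drop dice_rolls high_low mod → Pre_keep_drop dice_rolls high_low mod → Spec_keep_drop dice_rolls high_low mod (keep_drop dice_rolls high_low mod)


-- ===== LEMMAS AND PROOFS =====

-- abstract "pending removals" function: skip the first f x occurrences of each value x
def pvScanF (f : Int → Int) : List Int → List Int
  | [] => []
  | x :: xs => if f x > 0 then pvScanF (fun y => if y = x then f x - 1 else f y) xs else x :: pvScanF f xs

theorem pvScanB_eq (l : List Int) : ∀ cnt, pvScanB cnt l = pvScanF (fun x => cnt.getD x 0) l := by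
  induction l with
  | nil => intro cnt; rfl
  | cons x xs ih =>
    intro cnt
    simp only [pvScanB, pvScanF]
    by_cases h : cnt.getD x 0 > 0
    · rw [if_pos h, if_pos h, ih]
      congr 1
      funext y
      by_cases hy : y = x
      · subst hy; simp
      · simp [PySem.Dict.getD_insert, hy]
    · rw [if_neg h, if_neg h, ih]

theorem pvScanF_nonpos (l : List Int) (f : Int → Int) (h : ∀ x, f x ≤ 0) : pvScanF f l = l := by
  induction l with
  | nil => rfl
  | cons x xs ih => simp only [pvScanF, if_neg (by exact not_lt.mpr (h x))]; rw [ih]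

theorem pvScanF_bump (l : List Int) : ∀ (f : Int → Int) (v : Int), 0 ≤ f v →
    pvScanF (fun x => if x = v then f v + 1 else f x) l = pvScanF f (l.erase v) := by
  induction l with
  | nil => intro f v _; rfl
  | cons x xs ih =>
    intro f v hv
    by_cases hxv : x = v
    · subst hxv
      simp only [pvScanF, List.erase_cons_head, if_true]
      rw [if_pos (by omega : f x + 1 > 0)]
      have : (fun y => if y = x then f x + 1 - 1 else if y = x then f x + 1 else f y) = f := by
        funext y
        by_cases hy : y = x
        · subst hy; simp
        · simp [hy]
      rw [this]
    · have herase : (x :: xs).erase v = x :: xs.erase v := by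
        rw [List.erase_cons_tail]; simp [hxv]
      simp only [pvScanF, herase, if_neg hxv]
      by_cases hfx : f x > 0
      · rw [if_pos hfx, if_pos hfx]
        have hgv : (0:Int) ≤ if v = x then f x - 1 else f v := by
          rw [if_neg (Ne.symm hxv)]; exact hv
        have hfun : (fun y => if y = x then f x - 1 else if y = v then f v + 1 else f y)
            = (fun y => if y = v then (if v = x then f x - 1 else f v) + 1
                        else if y = x then f x - 1 else f y) := by
          funext y
          by_cases hy : y = x
          · subst hy; simp [hxv]
          · by_cases hyv : y = v
            · subst hyv; simp [Ne.symm hxv]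
            · simp [hy, hyv]
        rw [hfun]
        exact ih (fun y => if y = x then f x - 1 else f y) v hgv
      · rw [if_neg hfx, if_neg hfx, ih f v hv]

-- counts as an Int-valued function
def pvCnt (rest : List Int) : Int → Int := fun x => (rest.count x : Int)

theorem pvCnt_cons (v : Int) (rest : List Int) :
    pvCnt (v :: rest) = fun x => if x = v then pvCnt rest v + 1 else pvCnt rest x := by
  funext x
  by_cases h : x = v
  · subst h; simp [pvCnt]
  · simp [pvCnt, h, Ne.symm h]

theorem pvScanF_cnt_cons (l : List Int) (v : Int) (rest : List Int) :
    pvScanF (pvCnt (v :: rest)) l = pvScanF (pvCnt rest) (l.erase v) := by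
  rw [pvCnt_cons]
  exact pvScanF_bump l (pvCnt rest) v (by simp [pvCnt])

theorem pvScanF_cnt_nil (l : List Int) : pvScanF (pvCnt []) l = l :=
  pvScanF_nonpos l _ (by simp [pvCnt])

-- min/max of l is the head of the (reverse-)sorted list; erasing it sorts to the tail
theorem pv_sorted_head_min {l : List Int} {m : Int} {t : List Int}
    (h : PySem.List.sorted l (fun x => x) false = m :: t) :
    PySem.List.min? l (fun x => x) = some m := by
  have hmem : m ∈ l := by
    have : m ∈ PySem.List.sorted l (fun x => x) false := by rw [h]; simp
    rwa [PySem.List.mem_sorted] at this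
  have hne : l ≠ [] := fun hl => by simp [hl] at hmem
  obtain ⟨m', hm'⟩ : ∃ m', PySem.List.min? l (fun x => x) = some m' := by
    cases hmin : PySem.List.min? l (fun x => x) with
    | none => exact absurd ((PySem.List.min?_eq_none_iff _ _).mp hmin) hne
    | some m' => exact ⟨m', rfl⟩
  have hmem' : m' ∈ l := PySem.List.min?_mem hm'
  have h1 : m' ≤ m := PySem.List.min?_isMin hm' m hmem
  have h2 : m ≤ m' := PySem.List.key_head_sorted_le l (fun x => x) h m' hmem'
  rw [hm', le_antisymm h1 h2]

theorem pv_sorted_rev_head_max {l : List Int} {m : Int} {t : List Int}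
    (h : PySem.List.sorted l (fun x => x) true = m :: t) :
    PySem.List.max? l (fun x => x) = some m := by
  have hmem : m ∈ l := by
    have : m ∈ PySem.List.sorted l (fun x => x) true := by rw [h]; simp
    rwa [PySem.List.mem_sorted] at this
  have hne : l ≠ [] := fun hl => by simp [hl] at hmem
  obtain ⟨m', hm'⟩ : ∃ m', PySem.List.max? l (fun x => x) = some m' := by
    cases hmax : PySem.List.max? l (fun x => x) with
    | none => exact absurd ((PySem.List.max?_eq_none_iff _ _).mp hmax) hne
    | some m' => exact ⟨m', rfl⟩
  have hmem' : m' ∈ l := PySem.List.max?_mem hm'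
  have h1 : m ≤ m' := PySem.List.max?_isMax hm' m hmem
  have h2 : m' ≤ m := PySem.List.key_head_sorted_rev_ge l (fun x => x) h m' hmem'
  rw [hm', le_antisymm h2 h1]

theorem pv_sorted_erase_head {l : List Int} {m : Int} {t : List Int}
    (h : PySem.List.sorted l (fun x => x) false = m :: t) :
    PySem.List.sorted (l.erase m) (fun x => x) false = t := by
  have hperm : (PySem.List.sorted l (fun x => x) false).Perm l := PySem.List.sorted_perm _ _ _
  have hpt : t.Perm (l.erase m) := by
    have := hperm.erase m
    rw [h, List.erase_cons_head] at this
    exact this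
  have hpw : t.Pairwise (fun a b : Int => a ≤ b) := by
    have := PySem.List.sorted_pairwise l (fun x => x)
    rw [h] at this
    exact (List.pairwise_cons.mp this).2
  exact PySem.List.sorted_id_eq_of_perm_of_pairwise _ _ hpt hpw

theorem pv_sorted_rev_erase_head {l : List Int} {m : Int} {t : List Int}
    (h : PySem.List.sorted l (fun x => x) true = m :: t) :
    PySem.List.sorted (l.erase m) (fun x => x) true = t := by
  have hperm : (PySem.List.sorted l (fun x => x) true).Perm l := PySem.List.sorted_perm _ _ _
  have hpt : t.Perm (l.erase m) := by
    have := hperm.erase m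
    rw [h, List.erase_cons_head] at this
    exact this
  have hpw : t.Pairwise (fun a b : Int => b ≤ a) := by
    have := PySem.List.sorted_pairwise_rev l (fun x => x)
    rw [h] at this
    exact (List.pairwise_cons.mp this).2
  have hs : (PySem.List.sorted (l.erase m) (fun x => x) true).Perm t :=
    (PySem.List.sorted_perm _ _ _).trans hpt.symm
  have hpw' : (PySem.List.sorted (l.erase m) (fun x => x) true).Pairwise (fun a b : Int => b ≤ a) :=
    PySem.List.sorted_pairwise_rev _ _
  exact List.Perm.eq_of_pairwise (fun a b _ _ h1 h2 => le_antisymm h2 h1) hpw' hpw hs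

theorem pv_remove_getD {l : List Int} {m : Int} (h : m ∈ l) :
    (PySem.List.remove? l m).getD l = l.erase m := by
  rw [PySem.List.remove?_eq_some_erase _ _ h]; rfl

-- one step of A for 'h' / 'l' on a nonempty list
theorem pvStepA_h {l : List Int} {m : Int} {t : List Int} (acc : List String)
    (h : PySem.List.sorted l (fun x => x) false = m :: t) :
    pvStepA "h" (l, acc) = (l.erase m, acc ++ [pvFmt m]) := by
  have hmem : m ∈ l := by
    have : m ∈ PySem.List.sorted l (fun x => x) false := by rw [h]; simp
    rwa [PySem.List.mem_sorted] at this
  simp [pvStepA, pv_sorted_head_min h, pv_remove_getD hmem]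

theorem pvStepA_l {l : List Int} {m : Int} {t : List Int} (acc : List String)
    (h : PySem.List.sorted l (fun x => x) true = m :: t) :
    pvStepA "l" (l, acc) = (l.erase m, acc ++ [pvFmt m]) := by
  have hmem : m ∈ l := by
    have : m ∈ PySem.List.sorted l (fun x => x) true := by rw [h]; simp
    rwa [PySem.List.mem_sorted] at this
  simp [pvStepA, pv_sorted_rev_head_max h, pv_remove_getD hmem]

theorem pvLoopA_h (n : Nat) : ∀ (l : List Int) (acc : List String), n ≤ l.length →
    pvLoopA "h" n (l, acc) =
      (pvScanF (pvCnt ((PySem.List.sorted l (fun x => x) false).take n)) l,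
       acc ++ ((PySem.List.sorted l (fun x => x) false).take n).map pvFmt) := by
  induction n with
  | zero => intro l acc _; simp [pvLoopA, pvScanF_cnt_nil]
  | succ n ih =>
    intro l acc hn
    have hne : l ≠ [] := by intro hl; rw [hl] at hn; simp at hn
    obtain ⟨m, t, h⟩ : ∃ m t, PySem.List.sorted l (fun x => x) false = m :: t := by
      cases hs : PySem.List.sorted l (fun x => x) false with
      | nil => exact absurd ((PySem.List.sorted_eq_nil_iff _ _ _).mp hs) hne
      | cons m t => exact ⟨m, t, rfl⟩
    have hmem : m ∈ l := by
      have : m ∈ PySem.List.sorted l (fun x => x) false := by rw [h]; simp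
      rwa [PySem.List.mem_sorted] at this
    have hlen : n ≤ (l.erase m).length := by
      rw [List.length_erase_of_mem hmem]
      have : l.length ≠ 0 := by simpa using hne
      omega
    simp only [pvLoopA, pvStepA_h acc h]
    rw [ih (l.erase m) (acc ++ [pvFmt m]) hlen, pv_sorted_erase_head h, h]
    simp only [List.take_succ_cons, List.map_cons, pvScanF_cnt_cons]
    simp [List.append_assoc]

theorem pvLoopA_l (n : Nat) : ∀ (l : List Int) (acc : List String), n ≤ l.length →
    pvLoopA "l" n (l, acc) =
      (pvScanF (pvCnt ((PySem.List.sorted l (fun x => x) true).take n)) l,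
       acc ++ ((PySem.List.sorted l (fun x => x) true).take n).map pvFmt) := by
  induction n with
  | zero => intro l acc _; simp [pvLoopA, pvScanF_cnt_nil]
  | succ n ih =>
    intro l acc hn
    have hne : l ≠ [] := by intro hl; rw [hl] at hn; simp at hn
    obtain ⟨m, t, h⟩ : ∃ m t, PySem.List.sorted l (fun x => x) true = m :: t := by
      cases hs : PySem.List.sorted l (fun x => x) true with
      | nil => exact absurd ((PySem.List.sorted_eq_nil_iff _ _ _).mp hs) hne
      | cons m t => exact ⟨m, t, rfl⟩
    have hmem : m ∈ l := by
      have : m ∈ PySem.List.sorted l (fun x => x) true := by rw [h]; simp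
      rwa [PySem.List.mem_sorted] at this
    have hlen : n ≤ (l.erase m).length := by
      rw [List.length_erase_of_mem hmem]
      have : l.length ≠ 0 := by simpa using hne
      omega
    simp only [pvLoopA, pvStepA_l acc h]
    rw [ih (l.erase m) (acc ++ [pvFmt m]) hlen, pv_sorted_rev_erase_head h, h]
    simp only [List.take_succ_cons, List.map_cons, pvScanF_cnt_cons]
    simp [List.append_assoc]

theorem pvLoopA_other (high_low : String) (h1 : high_low ≠ "h") (h2 : high_low ≠ "l")
    (n : Nat) (st : List Int × List String) : pvLoopA high_low n st = st := by
  induction n with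
  | zero => rfl
  | succ n ih => simp only [pvLoopA, pvStepA, if_neg h1, if_neg h2]; exact ih

-- B's counter pass computes the abstract count-scan
theorem pvScanB_counts (removed l : List Int) :
    pvScanB (removed.foldl (fun d v => d.insert v (d.getD v 0 + 1)) PySem.Dict.empty) l
      = pvScanF (pvCnt removed) l := by
  rw [pvScanB_eq]
  congr 1
  funext x
  rw [PySem.Dict.getD_foldl_insert_add_one]
  simp [pvCnt, PySem.Dict.getD_empty]

-- ===== VERDICT (by name: the statement is the Claim_ definition above) =====
theorem keep_drop_spec : Claim_equal_keep_drop := by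
  intro dice_rolls high_low mod _ hpre
  unfold Spec_keep_drop keep_drop keep_drop_alt
  by_cases hh : high_low = "h"
  · subst hh
    have hlen : mod.toNat ≤ dice_rolls.length := by
      have := hpre (Or.inl rfl); omega
    have htn : (max mod 0).toNat = mod.toNat := by omega
    rw [pvLoopA_h mod.toNat dice_rolls [] hlen]
    have hs := PySem.List.slice_to (PySem.List.sorted dice_rolls (fun x => x) false)
      (show (0:Int) ≤ max mod 0 by omega)
    simp [pvScanB_counts, hs, htn, List.map_take]
  · by_cases hl : high_low = "l"
    · subst hl
      have hlen : mod.toNat ≤ dice_rolls.length := by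
        have := hpre (Or.inr rfl); omega
      have htn : (max mod 0).toNat = mod.toNat := by omega
      rw [pvLoopA_l mod.toNat dice_rolls [] hlen]
      have hs := PySem.List.slice_to (PySem.List.sorted dice_rolls (fun x => x) true)
        (show (0:Int) ≤ max mod 0 by omega)
      simp [pvScanB_counts, hs, htn, List.map_take]
    · rw [pvLoopA_other high_low hh hl]
      simp [hh, hl]
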